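-- pv_equiv track=rewrite | github.com/mabdh/query-by-humming | qbhmain/qbh_main.py | getUDS
-- ===== SOURCE A (Python) =====
-- def getUDS(listOfNoteData):
--     pointer = 1
--     listOfUDS = []
--     uds='s'
--     while(pointer<len(listOfNoteData)-1):
--         if(listOfNoteData[pointer]>listOfNoteData[pointer-1]):
--             uds='u'
--         elif(listOfNoteData[pointer]<listOfNoteData[pointer-1]):
--             uds='d'
--         pointer+=1
--         listOfUDS.append(uds)
--     return listOfUDS
-- ===== SOURCE B (Python) =====
-- def getUDS(listOfNoteData):
--     # Run-length encode the input into maximal runs of equal values.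
--     runs = []
--     i = 0
--     n = len(listOfNoteData)
--     while i < n:
--         j = i
--         while j < n and listOfNoteData[j] == listOfNoteData[i]:
--             j += 1
--         runs.append((listOfNoteData[i], j - i))
--         i = j
--     # First run's internal pairs carry the initial 's'; each later run of length L
--     # contributes L copies of its boundary direction (boundary pair + L-1 equal pairs).
--     out = []
--     if runs:
--         out = ['s'] * (runs[0][1] - 1)
--         prev = runs[0][0]
--         for value, length in runs[1:]:
--             out += ['u' if value > prev else 'd'] * length
--             prev = value
--     # A never emits an entry for the final pair.
--     return out[:-1]
-- ===== Notes on version B (the rewrite author's own statement) =====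
-- stated objective: alternative
-- what changed: Replaces A's per-index stateful scan by run-length encoding: the list is first grouped into maximal runs of equal values, then the output is emitted block-wise ('s' for the first run's internal pairs, one direction block per later run) with the final entry dropped to match A's off-by-one.
import Mathlib
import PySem

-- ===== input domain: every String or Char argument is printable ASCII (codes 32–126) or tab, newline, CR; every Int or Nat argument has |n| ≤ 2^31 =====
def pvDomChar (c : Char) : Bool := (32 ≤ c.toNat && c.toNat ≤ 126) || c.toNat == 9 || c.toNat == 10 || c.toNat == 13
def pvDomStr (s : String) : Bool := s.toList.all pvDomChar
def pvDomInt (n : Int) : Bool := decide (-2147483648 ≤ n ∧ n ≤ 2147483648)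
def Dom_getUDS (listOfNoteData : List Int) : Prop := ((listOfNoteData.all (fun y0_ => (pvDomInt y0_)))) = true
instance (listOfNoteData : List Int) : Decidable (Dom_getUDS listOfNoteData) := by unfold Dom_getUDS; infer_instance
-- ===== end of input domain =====

-- B replaces A's per-index stateful scan by run-length encoding: group the list into maximal
-- runs of equal values, emit 's' for the first run's internal pairs and one direction block
-- per later run, then drop the final entry (A's off-by-one); alternative decomposition.

-- ===== PORT A =====
-- while-loop ported as fuel recursion; fuel = length of the list always suffices
def getUDSgo (x : List Int) (fuel : Nat) (pointer : Int) (uds : String) (acc : List String) : List String :=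
  match fuel with
  | 0 => acc
  | Nat.succ f =>
    if pointer < (x.length : Int) - 1 then
      let cur := (PySem.List.pyGet? x pointer).getD 0
      let prev := (PySem.List.pyGet? x (pointer - 1)).getD 0
      let uds' := if cur > prev then "u" else if cur < prev then "d" else uds
      getUDSgo x f (pointer + 1) uds' (acc ++ [uds'])
    else acc

def getUDS (listOfNoteData : List Int) : List String :=
  getUDSgo listOfNoteData listOfNoteData.length 1 "s" []

-- ===== PORT B =====
-- Source B's inner while (advance j while equal to x[i]) is takeWhile/dropWhile of the run head
def runsGo (x : List Int) : List (Int × Nat) :=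
  match x with
  | [] => []
  | a :: t =>
    (a, 1 + (t.takeWhile (· == a)).length) :: runsGo (t.dropWhile (· == a))
termination_by x.length
decreasing_by
  simp only [List.length_cons]
  exact Nat.lt_succ_of_le (List.length_dropWhile_le _ _)

-- Source B's emission loop over runs[1:], carrying prev
def emitGo (prev : Int) : List (Int × Nat) → List String
  | [] => []
  | (v, len) :: t => List.replicate len (if v > prev then "u" else "d") ++ emitGo v t

-- Source B's 'out' before the final slice
def emitAll (x : List Int) : List String :=
  match runsGo x with
  | [] => []
  | (v0, n0) :: rest => List.replicate (n0 - 1) "s" ++ emitGo v0 rest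

def getUDS_alt (listOfNoteData : List Int) : List String :=
  (emitAll listOfNoteData).dropLast

-- ===== PRECONDITION & SPEC =====
def Spec_getUDS (listOfNoteData : List Int) (out : List String) : Prop := out = getUDS_alt listOfNoteData
instance (listOfNoteData : List Int) (out : List String) : Decidable (Spec_getUDS listOfNoteData out) := by unfold Spec_getUDS; infer_instance

-- ===== CLAIM (what is proved, stated in full; the proofs are below) =====
def Claim_equal_getUDS : Prop := ∀ (listOfNoteData : List Int), Dom_getUDS listOfNoteData → Spec_getUDS listOfNoteData (getUDS listOfNoteData)

-- ===== LEMMAS AND PROOFS =====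

-- common reference: a state scan over the list of consecutive pairs
def scanUDS : List (Int × Int) → String → List String
  | [], _ => []
  | (a, b) :: t, u =>
      let u' := if b > a then "u" else if b < a then "d" else u
      u' :: scanUDS t u'

theorem scanUDS_length (l : List (Int × Int)) (u : String) :
    (scanUDS l u).length = l.length := by
  induction l generalizing u with
  | nil => rfl
  | cons p t ih => obtain ⟨a, b⟩ := p; simp [scanUDS, ih]

theorem scanUDS_take (l : List (Int × Int)) (u : String) (k : Nat) :
    scanUDS (l.take k) u = (scanUDS l u).take k := by
  induction l generalizing u k with
  | nil => simp [scanUDS]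
  | cons p t ih =>
    obtain ⟨a, b⟩ := p
    cases k with
    | zero => simp [scanUDS]
    | succ k => simp [scanUDS, ih]

-- a run of values equal to a just propagates the carry u
theorem scanUDS_const_run (a : Int) (s r : List Int) (u : String)
    (hs : ∀ x ∈ s, x = a) :
    scanUDS ((a :: (s ++ r)).zip (s ++ r)) u
      = List.replicate s.length u ++ scanUDS ((a :: r).zip r) u := by
  induction s with
  | nil => simp
  | cons b s' ih =>
    have hb : b = a := hs b (by simp)
    subst hb
    have hs' : ∀ x ∈ s', x = b := fun x hx => hs x (by simp [hx])
    simp only [List.cons_append, List.zip_cons_cons, scanUDS, lt_irrefl, if_false,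
      List.length_cons, List.replicate_succ, List.cons_append]
    exact congrArg _ (ih hs')

theorem dropWhile_head_false {p : Int → Bool} (t : List Int) (b : Int) (r : List Int)
    (h : t.dropWhile p = b :: r) : p b = false := by
  induction t with
  | nil => simp [List.dropWhile] at h
  | cons c t' ih =>
    by_cases hc : p c
    · exact ih (by simpa [List.dropWhile, hc] using h)
    · rw [List.dropWhile_cons_of_neg hc] at h
      cases h; simpa using hc

-- after a boundary (head ≠ prev), the scan equals B's block emission over the runs
theorem scanUDS_eq_emitGo (a : Int) (r : List Int) (u : String)
    (hne : ∀ b r', r = b :: r' → b ≠ a) :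
    scanUDS ((a :: r).zip r) u = emitGo a (runsGo r) := by
  induction hn : r.length using Nat.strong_induction_on generalizing a r u with
  | _ n ih =>
    cases r with
    | nil => simp [scanUDS, runsGo, emitGo]
    | cons b r' =>
      have hba : b ≠ a := hne b r' rfl
      have hdir : (if b > a then "u" else if b < a then "d" else u)
          = (if b > a then "u" else "d") := by
        rcases lt_trichotomy a b with h | h | h
        · simp [h]
        · exact absurd h.symm hba
        · simp [not_lt_of_gt h, h]
      set s := r'.takeWhile (· == b) with hsdef
      set rr := r'.dropWhile (· == b) with hrrdef
      have hsplit : r' = s ++ rr := (List.takeWhile_append_dropWhile).symm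
      have hs : ∀ x ∈ s, x = b := by
        intro x hx
        have := List.mem_takeWhile_imp hx
        simpa using this
      have hlen : rr.length < n := by
        have h1 : rr.length ≤ r'.length := List.length_dropWhile_le _ _
        simp only [List.length_cons] at hn
        omega
      have hne' : ∀ c rc, rr = c :: rc → c ≠ b := by
        intro c rc hc
        have := dropWhile_head_false (p := (· == b)) r' c rc (hrrdef ▸ hc)
        simpa using this
      calc scanUDS ((a :: b :: r').zip (b :: r')) u
          = (if b > a then "u" else "d")
              :: scanUDS ((b :: r').zip r') (if b > a then "u" else "d") := by
            simp only [List.zip_cons_cons, scanUDS]; rw [hdir]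
        _ = (if b > a then "u" else "d")
              :: (List.replicate s.length (if b > a then "u" else "d")
                  ++ scanUDS ((b :: rr).zip rr) (if b > a then "u" else "d")) := by
            rw [hsplit, scanUDS_const_run b s rr _ hs]
        _ = List.replicate (1 + s.length) (if b > a then "u" else "d")
              ++ emitGo b (runsGo rr) := by
            rw [ih rr.length hlen b rr _ hne' rfl, Nat.add_comm 1 s.length,
              List.replicate_succ, List.cons_append]
        _ = emitGo a (runsGo (b :: r')) := by
            simp only [runsGo, emitGo, hsdef, hrrdef]
      -- done

-- full characterisation of B's un-truncated emission
theorem emit_eq_scan (a : Int) (t : List Int) :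
    emitAll (a :: t) = scanUDS ((a :: t).zip t) "s" := by
  simp only [emitAll, runsGo]
  set s := t.takeWhile (· == a) with hsdef
  set r := t.dropWhile (· == a) with hrdef
  have hsplit : t = s ++ r := (List.takeWhile_append_dropWhile).symm
  have hs : ∀ x ∈ s, x = a := by
    intro x hx; have := List.mem_takeWhile_imp hx; simpa using this
  have hne : ∀ b r', r = b :: r' → b ≠ a := by
    intro b r' hb
    have := dropWhile_head_false (p := (· == a)) t b r' (hrdef ▸ hb)
    simpa using this
  rw [hsplit, scanUDS_const_run a s r "s" hs, scanUDS_eq_emitGo a r "s" hne]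
  simp

-- A's loop equals the reference scan (invariant: pointer = pre.length + 1)
theorem goA_eq_scan (pre : List Int) (a : Int) (rest : List Int) (u : String)
    (acc : List String) (fuel : Nat) (hf : rest.length ≤ fuel) :
    getUDSgo (pre ++ a :: rest) fuel ((pre.length : Int) + 1) u acc =
      acc ++ scanUDS (((a :: rest).zip rest).take (rest.length - 1)) u := by
  induction fuel generalizing pre a rest u acc with
  | zero =>
    have : rest = [] := by
      cases rest with
      | nil => rfl
      | cons _ _ => simp at hf
    subst this
    simp [getUDSgo, scanUDS]
  | succ f ih =>
    match rest, hf with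
    | [], _ =>
      have hc : ¬ ((pre.length : Int) + 1 < ((pre ++ [a]).length : Int) - 1) := by
        simp
      simp only [getUDSgo, if_neg hc]
      simp [scanUDS]
    | [b], _ =>
      have hc : ¬ ((pre.length : Int) + 1 < ((pre ++ [a, b]).length : Int) - 1) := by
        simp [List.length_append]; omega
      simp only [getUDSgo, if_neg hc]
      simp [scanUDS]
    | b :: c :: rest', hf =>
      have hlen : ((pre ++ a :: b :: c :: rest').length : Int) = pre.length + 3 + rest'.length := by
        simp [List.length_append]; ring
      have hcond : (pre.length : Int) + 1 < ((pre ++ a :: b :: c :: rest').length : Int) - 1 := by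
        rw [hlen]; omega
      have hprev : PySem.List.pyGet? (pre ++ a :: b :: c :: rest') ((pre.length : Int) + 1 - 1) = some a := by
        have : (pre.length : Int) + 1 - 1 = (pre.length : Int) := by ring
        rw [this]
        exact PySem.List.pyGet?_append_length pre _ a
      have hcur : PySem.List.pyGet? (pre ++ a :: b :: c :: rest') ((pre.length : Int) + 1) = some b := by
        have h1 : pre ++ a :: b :: c :: rest' = (pre ++ [a]) ++ b :: c :: rest' := by simp
        have h2 : (pre.length : Int) + 1 = (((pre ++ [a]).length : Nat) : Int) := by
          simp
        rw [h1, h2]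
        exact PySem.List.pyGet?_append_length (pre ++ [a]) _ b
      simp only [getUDSgo, if_pos hcond, hprev, hcur, Option.getD_some]
      have hstep : getUDSgo (pre ++ a :: b :: c :: rest') f ((pre.length : Int) + 1 + 1)
            (if b > a then "u" else if b < a then "d" else u)
            (acc ++ [if b > a then "u" else if b < a then "d" else u]) =
          (acc ++ [if b > a then "u" else if b < a then "d" else u]) ++
            scanUDS (((b :: c :: rest').zip (c :: rest')).take ((c :: rest').length - 1))
              (if b > a then "u" else if b < a then "d" else u) := by
        have h1 : pre ++ a :: b :: c :: rest' = (pre ++ [a]) ++ b :: c :: rest' := by simp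
        have h2 : (pre.length : Int) + 1 + 1 = (((pre ++ [a]).length : Nat) : Int) + 1 := by
          simp
        rw [h1, h2]
        exact ih (pre ++ [a]) b (c :: rest') _ _ (by simp at hf ⊢; omega)
      have ht : List.take ((b :: c :: rest').length - 1) ((a :: b :: c :: rest').zip (b :: c :: rest'))
          = (a, b) :: List.take ((c :: rest').length - 1) ((b :: c :: rest').zip (c :: rest')) := by
        simp [List.zip_cons_cons]
      rw [hstep, List.append_assoc, ht]
      simp [scanUDS]

-- ===== VERDICT (by name: the statement is the Claim_ definition above) =====
theorem getUDS_spec : Claim_equal_getUDS := by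
  intro x _
  unfold Spec_getUDS getUDS getUDS_alt
  cases x with
  | nil => simp [getUDSgo, emitAll, runsGo]
  | cons a rest =>
    rw [emit_eq_scan a rest]
    have hA := goA_eq_scan [] a rest "s" [] (a :: rest).length (by simp)
    simp only [List.nil_append, List.length_nil, Nat.cast_zero, zero_add] at hA
    rw [hA, List.dropLast_eq_take, scanUDS_take]
    congr 1
    rw [scanUDS_length]
    simp [List.length_zip]
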